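-- pv_equiv track=rewrite | github.com/Rzy6934/Football-Match-Predictor | process_data.py | get_3_wins_losses_streaks
-- ===== SOURCE A (Python) =====
-- def get_3_wins_losses_streaks(all_teams_5g_streaks):
--     all_teams_3_wins_streaks = []
--     all_teams_3_losses_streaks = []
--     team_3_wins_streaks = []
--     team_3_losses_streaks = []
--     three_wins_streaks = 0
--     three_losses_streaks = 0
--
--     for team_5g_streaks in all_teams_5g_streaks:
--         for streak in team_5g_streaks:
--             if streak[-3:] == "WWW":
--                 three_wins_streaks += 1
--             elif streak[-3:] == "LLL":
--                 three_losses_streaks += 1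
--             team_3_wins_streaks.append(three_wins_streaks)
--             team_3_losses_streaks.append(three_losses_streaks)
--
--         all_teams_3_wins_streaks.append(team_3_wins_streaks)
--         all_teams_3_losses_streaks.append(team_3_losses_streaks)
--         team_3_wins_streaks = []
--         team_3_losses_streaks = []
--         three_wins_streaks = 0
--         three_losses_streaks = 0
--
--     return all_teams_3_wins_streaks, all_teams_3_losses_streaks
-- ===== SOURCE B (Python) =====
-- def get_3_wins_losses_streaks(all_teams_5g_streaks):
--     all_teams_3_wins_streaks = []
--     all_teams_3_losses_streaks = []
--     for team in all_teams_5g_streaks: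
--         ind_w = [1 if s[-3:] == "WWW" else 0 for s in team]
--         ind_l = [1 if s[-3:] == "LLL" else 0 for s in team]
--         all_teams_3_wins_streaks.append([sum(ind_w[: i + 1]) for i in range(len(team))])
--         all_teams_3_losses_streaks.append([sum(ind_l[: i + 1]) for i in range(len(team))])
--     return all_teams_3_wins_streaks, all_teams_3_losses_streaks
-- ===== Notes on version B (the rewrite author's own statement) =====
-- stated objective: alternative
-- what changed: Replaces A's fused loop with mutable running counters by a classify-then-prefix-sum decomposition: per team build 0/1 indicator lists for WWW/LLL endings, then form each cumulative list as sums of indicator prefixes.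
import Mathlib
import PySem

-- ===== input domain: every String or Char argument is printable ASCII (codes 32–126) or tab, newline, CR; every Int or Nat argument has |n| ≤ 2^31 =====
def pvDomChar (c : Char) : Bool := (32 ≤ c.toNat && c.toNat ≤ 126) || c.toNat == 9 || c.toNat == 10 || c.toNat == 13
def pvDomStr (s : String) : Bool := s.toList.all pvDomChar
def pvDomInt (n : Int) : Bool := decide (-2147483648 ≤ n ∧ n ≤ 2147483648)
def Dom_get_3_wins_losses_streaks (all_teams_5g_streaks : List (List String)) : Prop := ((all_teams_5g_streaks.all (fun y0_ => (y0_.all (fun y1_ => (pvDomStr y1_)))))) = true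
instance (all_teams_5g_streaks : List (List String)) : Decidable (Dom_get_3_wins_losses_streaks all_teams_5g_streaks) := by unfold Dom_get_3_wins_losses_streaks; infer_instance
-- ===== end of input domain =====

-- B replaces A's fused running-counter loop by a classify-then-prefix-sum decomposition (alternative, same outputs).

-- ===== PORT A =====
-- Literal transliteration: outer loop over teams, inner loop carrying the two
-- per-team cumulative lists and the two counters (reset to [],[],0,0 per team,
-- exactly as A's end-of-iteration reset leaves them).
def get_3_wins_losses_streaks (all_teams_5g_streaks : List (List String)) : List (List Int) × List (List Int) :=
  all_teams_5g_streaks.foldl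
    (fun (acc : List (List Int) × List (List Int)) team_5g_streaks =>
      let inner := team_5g_streaks.foldl
        (fun (s : List Int × List Int × Int × Int) streak =>
          let wl :=
            if PySem.Str.slice streak (some (-3)) none = "WWW" then (s.2.2.1 + 1, s.2.2.2)
            else if PySem.Str.slice streak (some (-3)) none = "LLL" then (s.2.2.1, s.2.2.2 + 1)
            else (s.2.2.1, s.2.2.2)
          (s.1 ++ [wl.1], s.2.1 ++ [wl.2], wl.1, wl.2))
        ([], [], 0, 0)
      (acc.1 ++ [inner.1], acc.2 ++ [inner.2.1]))
    ([], [])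

-- ===== PORT B =====
-- Literal transliteration of Source B: per team two 0/1 indicator lists, then the
-- cumulative lists as sums of indicator prefixes (ind[:i+1] = take (i+1), exact
-- for the nonnegative bound i+1).
def get_3_wins_losses_streaks_alt (all_teams_5g_streaks : List (List String)) : List (List Int) × List (List Int) :=
  all_teams_5g_streaks.foldl
    (fun (acc : List (List Int) × List (List Int)) team =>
      let ind_w : List Int := team.map (fun s => if PySem.Str.slice s (some (-3)) none = "WWW" then 1 else 0)
      let ind_l : List Int := team.map (fun s => if PySem.Str.slice s (some (-3)) none = "LLL" then 1 else 0)
      (acc.1 ++ [(List.range team.length).map (fun i => (ind_w.take (i + 1)).sum)],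
       acc.2 ++ [(List.range team.length).map (fun i => (ind_l.take (i + 1)).sum)]))
    ([], [])

-- ===== PRECONDITION & SPEC =====
def Spec_get_3_wins_losses_streaks (all_teams_5g_streaks : List (List String)) (out : List (List Int) × List (List Int)) : Prop := out = get_3_wins_losses_streaks_alt all_teams_5g_streaks
instance (all_teams_5g_streaks : List (List String)) (out : List (List Int) × List (List Int)) : Decidable (Spec_get_3_wins_losses_streaks all_teams_5g_streaks out) := by unfold Spec_get_3_wins_losses_streaks; infer_instance

-- ===== CLAIM (what is proved, stated in full; the proofs are below) =====
def Claim_equal_get_3_wins_losses_streaks : Prop := ∀ (all_teams_5g_streaks : List (List String)), Dom_get_3_wins_losses_streaks all_teams_5g_streaks → Spec_get_3_wins_losses_streaks all_teams_5g_streaks (get_3_wins_losses_streaks all_teams_5g_streaks)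

-- ===== LEMMAS AND PROOFS =====

-- the indicator values A's branch adds: f for wins, g for losses
def pvF (s : String) : Int := if PySem.Str.slice s (some (-3)) none = "WWW" then 1 else 0
def pvG (s : String) : Int := if PySem.Str.slice s (some (-3)) none = "LLL" then 1 else 0

-- A's inner loop, generalized over the carried state, equals prefix sums.
theorem inner_eq (team : List String) : ∀ (tw tl : List Int) (w l : Int),
    team.foldl
        (fun (s : List Int × List Int × Int × Int) streak =>
          let wl :=
            if PySem.Str.slice streak (some (-3)) none = "WWW" then (s.2.2.1 + 1, s.2.2.2)
            else if PySem.Str.slice streak (some (-3)) none = "LLL" then (s.2.2.1, s.2.2.2 + 1)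
            else (s.2.2.1, s.2.2.2)
          (s.1 ++ [wl.1], s.2.1 ++ [wl.2], wl.1, wl.2))
        (tw, tl, w, l)
      = (tw ++ (List.range team.length).map (fun i => w + ((team.map pvF).take (i + 1)).sum),
         tl ++ (List.range team.length).map (fun i => l + ((team.map pvG).take (i + 1)).sum),
         w + (team.map pvF).sum, l + (team.map pvG).sum) := by
  induction team with
  | nil => intro tw tl w l; simp
  | cons s rest ih =>
    intro tw tl w l
    have hstep : (if PySem.Str.slice s (some (-3)) none = "WWW" then ((w + 1 : Int), l)
        else if PySem.Str.slice s (some (-3)) none = "LLL" then (w, l + 1)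
        else (w, l)) = (w + pvF s, l + pvG s) := by
      unfold pvF pvG
      by_cases h1 : PySem.Str.slice s (some (-3)) none = "WWW"
      · simp [h1]
      · by_cases h2 : PySem.Str.slice s (some (-3)) none = "LLL" <;> simp [h1, h2]
    simp only [List.foldl_cons, hstep]
    rw [ih (tw ++ [w + pvF s]) (tl ++ [l + pvG s]) (w + pvF s) (l + pvG s)]
    simp [List.range_succ_eq_map, List.map_map, Function.comp, add_assoc]

theorem folds_eq (xs : List (List String)) : ∀ (acc : List (List Int) × List (List Int)),
    xs.foldl
      (fun (acc : List (List Int) × List (List Int)) team_5g_streaks =>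
        let inner := team_5g_streaks.foldl
          (fun (s : List Int × List Int × Int × Int) streak =>
            let wl :=
              if PySem.Str.slice streak (some (-3)) none = "WWW" then (s.2.2.1 + 1, s.2.2.2)
              else if PySem.Str.slice streak (some (-3)) none = "LLL" then (s.2.2.1, s.2.2.2 + 1)
              else (s.2.2.1, s.2.2.2)
            (s.1 ++ [wl.1], s.2.1 ++ [wl.2], wl.1, wl.2))
          ([], [], 0, 0)
        (acc.1 ++ [inner.1], acc.2 ++ [inner.2.1]))
      acc
    = xs.foldl
      (fun (acc : List (List Int) × List (List Int)) team =>
        let ind_w : List Int := team.map (fun s => if PySem.Str.slice s (some (-3)) none = "WWW" then 1 else 0)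
        let ind_l : List Int := team.map (fun s => if PySem.Str.slice s (some (-3)) none = "LLL" then 1 else 0)
        (acc.1 ++ [(List.range team.length).map (fun i => (ind_w.take (i + 1)).sum)],
         acc.2 ++ [(List.range team.length).map (fun i => (ind_l.take (i + 1)).sum)]))
      acc := by
  induction xs with
  | nil => intro acc; rfl
  | cons team rest ih =>
    intro acc
    simp only [List.foldl_cons]
    rw [inner_eq team [] [] 0 0]
    rw [ih]
    congr 2 <;> (simp; exact fun a _ => rfl)

-- ===== VERDICT (by name: the statement is the Claim_ definition above) =====
theorem get_3_wins_losses_streaks_spec : Claim_equal_get_3_wins_losses_streaks := by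
  intro xs _
  show get_3_wins_losses_streaks xs = get_3_wins_losses_streaks_alt xs
  unfold get_3_wins_losses_streaks get_3_wins_losses_streaks_alt
  exact folds_eq xs ([], [])
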